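-- pv_equiv track=rewrite | github.com/XJenso73/AdventOfCode | 2023/day02.py | _calculate_game_power
-- ===== SOURCE A (Python) =====
-- def _calculate_game_power(sets: list[dict[str, int]]) -> int:
--     power = []
--
--     for games in sets:
--         max_red = 0
--         max_green = 0
--         max_blue = 0
--         for game in games:
--             max_red = max(max_red, game.get("red", 0))
--             max_green = max(max_green, game.get("green", 0))
--             max_blue = max(max_blue, game.get("blue", 0))
--         power.append(max_red * max_green * max_blue)
--
--     return sum(power)
-- ===== SOURCE B (Python) =====
-- def _calculate_game_power(sets: list[dict[str, int]]) -> int: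
--     def top(games, color):
--         # largest count of `color` drawn in this set: sort the observed counts
--         # (with a 0 sentinel for "never drawn") descending and take the head
--         return sorted([game.get(color, 0) for game in games] + [0], reverse=True)[0]
--
--     total = 0
--     for games in sets:
--         total += top(games, "red") * top(games, "green") * top(games, "blue")
--     return total
-- ===== Notes on version B (the rewrite author's own statement) =====
-- stated objective: alternative
-- what changed: Each per-set colour maximum is obtained by sorting the colour's observed counts descending and taking the head (sort-then-pick) instead of A's single pass threading three running max accumulators, and the sum is accumulated directly instead of appending to a power list that is summed at the end.
import Mathlib
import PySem

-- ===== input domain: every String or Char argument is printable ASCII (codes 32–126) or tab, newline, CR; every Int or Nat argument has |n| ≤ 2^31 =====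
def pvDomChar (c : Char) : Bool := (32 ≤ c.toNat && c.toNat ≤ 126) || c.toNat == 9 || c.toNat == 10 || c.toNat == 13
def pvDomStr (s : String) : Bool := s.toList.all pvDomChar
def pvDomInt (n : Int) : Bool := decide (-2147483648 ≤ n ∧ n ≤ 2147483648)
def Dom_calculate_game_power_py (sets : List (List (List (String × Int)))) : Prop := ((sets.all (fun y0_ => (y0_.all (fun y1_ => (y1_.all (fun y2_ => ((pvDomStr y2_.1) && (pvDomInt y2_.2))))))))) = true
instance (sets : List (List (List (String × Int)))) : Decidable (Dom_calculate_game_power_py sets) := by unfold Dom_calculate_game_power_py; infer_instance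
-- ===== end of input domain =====

-- B computes each per-set colour maximum by sorting the colour's counts descending and taking
-- the head, accumulating the sum directly (objective: alternative algorithm; not faster).

-- shared primitive: Python's game.get(color, 0) (first-match dict lookup, exact)
def pvGet (g : List (String × Int)) (c : String) : Int := (PySem.Dict.mk g).getD c 0

-- ===== PORT A =====
def calculate_game_power_py (sets : List (List (List (String × Int)))) : Int :=
  -- power = []; for games in sets: three running maxes, append product; return sum(power)
  (sets.foldl (fun (power : List Int) games =>
      let m := games.foldl
        (fun (acc : Int × Int × Int) game =>
          (max acc.1 (pvGet game "red"),
           max acc.2.1 (pvGet game "green"),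
           max acc.2.2 (pvGet game "blue")))
        (0, 0, 0)
      power ++ [m.1 * m.2.1 * m.2.2]) []).foldl (· + ·) 0

-- ===== PORT B =====
-- top(games, color) = sorted([game.get(color, 0) for game in games] + [0], reverse=True)[0]
def pvTop (games : List (List (String × Int))) (color : String) : Int :=
  PySem.List.pyGetD
    (PySem.List.sorted ((games.map (fun game => pvGet game color)) ++ [0]) (fun x => x) true) 0 0

def calculate_game_power_py_alt (sets : List (List (List (String × Int)))) : Int :=
  sets.foldl (fun total games =>
    total + pvTop games "red" * pvTop games "green" * pvTop games "blue") 0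

-- ===== PRECONDITION & SPEC =====
def Spec_calculate_game_power_py (sets : List (List (List (String × Int)))) (out : Int) : Prop := out = calculate_game_power_py_alt sets
instance (sets : List (List (List (String × Int)))) (out : Int) : Decidable (Spec_calculate_game_power_py sets out) := by unfold Spec_calculate_game_power_py; infer_instance

-- ===== CLAIM (what is proved, stated in full; the proofs are below) =====
def Claim_equal_calculate_game_power_py : Prop := ∀ (sets : List (List (List (String × Int)))), Dom_calculate_game_power_py sets → Spec_calculate_game_power_py sets (calculate_game_power_py sets)

-- ===== LEMMAS AND PROOFS =====

-- foldl max is an upper bound of the seed and the list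
theorem foldl_max_ub (l : List Int) (a : Int) :
    a ≤ l.foldl max a ∧ ∀ y ∈ l, y ≤ l.foldl max a := by
  induction l generalizing a with
  | nil => simp
  | cons x xs ih =>
    simp only [List.foldl_cons]
    refine ⟨le_trans (le_max_left _ _) (ih _).1, fun y hy => ?_⟩
    rcases List.mem_cons.mp hy with h | h
    · exact h ▸ le_trans (le_max_right _ _) (ih _).1
    · exact (ih _).2 y h

-- foldl max is attained: it is the seed or an element
theorem foldl_max_mem (l : List Int) (a : Int) : l.foldl max a ∈ a :: l := by
  induction l generalizing a with
  | nil => simp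
  | cons x xs ih =>
    rw [List.foldl_cons]
    rcases List.mem_cons.mp (ih (max a x)) with h | h
    · rw [h]; rcases max_choice a x with hm | hm <;> simp [hm]
    · simp [h]

-- head of the reverse-sorted (values ++ [0]) is the running max from 0
theorem top_eq_foldl_max (l : List Int) :
    PySem.List.pyGetD (PySem.List.sorted (l ++ [0]) (fun x => x) true) 0 0 = l.foldl max 0 := by
  rcases hs : PySem.List.sorted (l ++ [0]) (fun x => x) true with _ | ⟨m, t⟩
  · exact absurd ((PySem.List.sorted_eq_nil_iff _ _ _).mp hs) (by simp)
  · rw [PySem.List.pyGetD_zero_cons]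
    have hub : ∀ y ∈ l ++ [(0:Int)], y ≤ m := by
      simpa using PySem.List.key_head_sorted_rev_ge (l ++ [(0:Int)]) (fun x => x) hs
    have hmem : m ∈ l ++ [0] := by
      have : m ∈ PySem.List.sorted (l ++ [0]) (fun x => x) true := by rw [hs]; simp
      exact (PySem.List.mem_sorted _ _ _ m).mp this
    have h1 : m ≤ l.foldl max 0 := by
      rcases List.mem_append.mp hmem with h | h
      · exact (foldl_max_ub l 0).2 m h
      · simp at h; simpa [h] using (foldl_max_ub l 0).1
    have h2 : l.foldl max 0 ≤ m := by
      rcases List.mem_cons.mp (foldl_max_mem l 0) with h | h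
      · rw [h]; exact hub 0 (by simp)
      · exact hub _ (List.mem_append.mpr (Or.inl h))
    exact le_antisymm h1 h2

-- A's triple-accumulator fold is the triple of three independent max-folds
theorem trip_fold (games : List (List (String × Int))) (a b c : Int) :
    games.foldl
      (fun (acc : Int × Int × Int) game =>
        (max acc.1 (pvGet game "red"),
         max acc.2.1 (pvGet game "green"),
         max acc.2.2 (pvGet game "blue"))) (a, b, c)
    = (games.foldl (fun m g => max m (pvGet g "red")) a,
       games.foldl (fun m g => max m (pvGet g "green")) b,
       games.foldl (fun m g => max m (pvGet g "blue")) c) := by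
  induction games generalizing a b c with
  | nil => rfl
  | cons g gs ih => simp [List.foldl_cons, ih]

-- A's list-building fold is acc ++ map
theorem build_fold (sets : List (List (List (String × Int)))) (f : List (List (String × Int)) → Int)
    (acc : List Int) :
    sets.foldl (fun p gs => p ++ [f gs]) acc = acc ++ sets.map f := by
  induction sets generalizing acc with
  | nil => simp
  | cons s ss ih => simp [List.foldl_cons, ih]

-- B's pvTop is A's running max
theorem pvTop_eq (games : List (List (String × Int))) (c : String) :
    pvTop games c = games.foldl (fun m g => max m (pvGet g c)) 0 := by
  unfold pvTop
  rw [top_eq_foldl_max, List.foldl_map]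

-- ===== VERDICT (by name: the statement is the Claim_ definition above) =====
theorem calculate_game_power_py_spec : Claim_equal_calculate_game_power_py := by
  intro sets _
  unfold Spec_calculate_game_power_py calculate_game_power_py calculate_game_power_py_alt
  rw [build_fold]
  simp only [List.nil_append, trip_fold, pvTop_eq]
  rw [List.foldl_map]
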